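-- pv_equiv track=rewrite | github.com/DagyeongH/algorithm | 프로그래머스/lv0/120843. 공 던지기/공 던지기.py | solution
-- ===== SOURCE A (Python) =====
-- def solution(numbers, k):
--     idx = 0
--     while k != 1:
--         k -= 1
--         idx += 2
--         if idx >= len(numbers):
--             idx = idx % len(numbers)
--     return numbers[idx]
-- ===== SOURCE B (Python) =====
-- def solution(numbers, k):
--     return numbers[2 * (k - 1) % len(numbers)]
-- ===== Notes on version B (the rewrite author's own statement) =====
-- stated objective: faster
-- what changed: replaces the k-1-iteration while loop that steps the index by 2 with the closed-form index 2*(k-1) % len(numbers)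
import Mathlib
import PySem

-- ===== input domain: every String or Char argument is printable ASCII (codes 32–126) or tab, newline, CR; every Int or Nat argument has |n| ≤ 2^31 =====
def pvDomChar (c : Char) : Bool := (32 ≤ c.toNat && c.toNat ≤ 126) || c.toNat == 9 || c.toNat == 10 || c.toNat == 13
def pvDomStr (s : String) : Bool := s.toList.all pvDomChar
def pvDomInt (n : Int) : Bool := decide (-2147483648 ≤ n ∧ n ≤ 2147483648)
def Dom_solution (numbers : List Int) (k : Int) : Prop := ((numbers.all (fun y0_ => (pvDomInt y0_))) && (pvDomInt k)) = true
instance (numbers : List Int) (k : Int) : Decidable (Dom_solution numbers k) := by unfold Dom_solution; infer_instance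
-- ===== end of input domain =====

-- B replaces A's k-1-step while loop by the closed-form index 2*(k-1) % len(numbers) (O(1) vs O(k)).

-- ===== PORT A =====
-- the while loop, with fuel (k-1).toNat: exactly the number of iterations when k ≥ 1;
-- for k < 1 the Python loop diverges (excluded by Pre_), the fuel-0 branch is never claimed about
def solutionGo (numbers : List Int) (fuel : Nat) (k : Int) (idx : Int) : Int :=
  if k = 1 then (PySem.List.pyGet? numbers idx).getD 0
  else match fuel with
    | 0 => 0
    | f + 1 =>
      let idx2 := idx + 2
      let idx3 := if idx2 ≥ (numbers.length : Int)
                  then PySem.Int.mod idx2 (numbers.length : Int) else idx2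
      solutionGo numbers f (k - 1) idx3

def solution (numbers : List Int) (k : Int) : Int :=
  solutionGo numbers (k - 1).toNat k 0

-- ===== PORT B =====
def solution_alt (numbers : List Int) (k : Int) : Int :=
  (PySem.List.pyGet? numbers (PySem.Int.mod (2 * (k - 1)) (numbers.length : Int))).getD 0

-- ===== PRECONDITION & SPEC =====
-- A raises ZeroDivisionError/IndexError on empty numbers and loops forever for k < 1
def Pre_solution (numbers : List Int) (k : Int) : Prop := numbers ≠ [] ∧ 1 ≤ k
instance (numbers : List Int) (k : Int) : Decidable (Pre_solution numbers k) := by unfold Pre_solution; infer_instance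
def pvWitness_solution : List Int × Int := ([1, 2, 3, 4], 3)

def Spec_solution (numbers : List Int) (k : Int) (out : Int) : Prop := out = solution_alt numbers k
instance (numbers : List Int) (k : Int) (out : Int) : Decidable (Spec_solution numbers k out) := by unfold Spec_solution; infer_instance

-- ===== CLAIM (what is proved, stated in full; the proofs are below) =====
def Claim_equal_solution : Prop := ∀ (numbers : List Int) (k : Int), Dom_solution numbers k → Pre_solution numbers k → Spec_solution numbers k (solution numbers k)

-- ===== LEMMAS AND PROOFS =====

theorem solutionGo_eq (numbers : List Int) (fuel : Nat) :
    ∀ idx : Int, numbers ≠ [] → 0 ≤ idx → idx < (numbers.length : Int) →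
    solutionGo numbers fuel ((fuel : Int) + 1) idx =
      (PySem.List.pyGet? numbers
        (PySem.Int.mod (idx + 2 * (fuel : Int)) (numbers.length : Int))).getD 0 := by
  induction fuel with
  | zero =>
    intro idx hne h0 hlt
    have hn : (0 : Int) < (numbers.length : Int) := by
      have := List.length_pos_of_ne_nil hne; exact_mod_cast this
    rw [PySem.Int.mod_eq_emod_of_pos hn]
    simp [solutionGo, Int.emod_eq_of_lt h0 hlt]
  | succ f ih =>
    intro idx hne h0 hlt
    have hn : (0 : Int) < (numbers.length : Int) := by
      have := List.length_pos_of_ne_nil hne; exact_mod_cast this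
    have hne1 : ¬ ((f : Int) + 1 + 1 = 1) := by omega
    rw [show (((f + 1 : Nat) : Int) + 1) = ((f : Int) + 1 + 1) by push_cast; ring]
    simp only [solutionGo, if_neg hne1]
    set n : Int := (numbers.length : Int) with hndef
    have hstep : (if idx + 2 ≥ n then PySem.Int.mod (idx + 2) n else idx + 2) =
        (idx + 2) % n := by
      rw [PySem.Int.mod_eq_emod_of_pos hn]
      split_ifs with h
      · rfl
      · exact (Int.emod_eq_of_lt (by omega) (by omega)).symm
    simp only [hstep]
    have h0' : 0 ≤ (idx + 2) % n := Int.emod_nonneg _ (by omega)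
    have hlt' : (idx + 2) % n < n := Int.emod_lt_of_pos _ hn
    rw [show ((f : Int) + 1 + 1 - 1) = (f : Int) + 1 by ring]
    rw [ih ((idx + 2) % n) hne h0' hlt']
    have hc : ((idx + 2) % n + 2 * (f : Int)) % n = (idx + 2 * (((f + 1 : Nat)) : Int)) % n := by
      rw [Int.emod_add_emod]
      push_cast
      ring_nf
    rw [PySem.Int.mod_eq_emod_of_pos hn, PySem.Int.mod_eq_emod_of_pos hn, hc]

-- ===== VERDICT (by name: the statement is the Claim_ definition above) =====
theorem solution_spec : Claim_equal_solution := by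
  intro numbers k _ hpre
  obtain ⟨hne, hk⟩ := hpre
  unfold Spec_solution solution solution_alt
  have hfuel : ((k - 1).toNat : Int) + 1 = k := by omega
  have := solutionGo_eq numbers (k - 1).toNat 0 hne le_rfl
    (by have := List.length_pos_of_ne_nil hne; exact_mod_cast this)
  rw [hfuel] at this
  have hc : (((k - 1).toNat : Nat) : Int) = k - 1 := Int.toNat_of_nonneg (by omega)
  rw [hc, zero_add] at this
  exact this
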